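-- pv_equiv track=rewrite | github.com/jzlandis/Geometry_PyModule | vectors_and_systems.py | p2cs
-- ===== SOURCE A (Python) =====
-- def p2cs(p,cs):
--     tempcoords = []
--     for i in range(len(cs)):
--         try:
--             tempcoords.append([p[i]*cs[i][x] for x in range(len(cs[i]))])
--         except IndexError:
--             pass
--         #tempcoords = [a+b for a,b in zip(tempcoords,[p[i]*cs[i][x] for x in range(len(cs[0]))])]
--     return [sum([tempcoords[k][l] for k in range(len(tempcoords))]) for l in range(len(tempcoords[0]))]
-- ===== SOURCE B (Python) =====
-- def p2cs(p, cs):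
--     # Single-pass accumulator: fold each weighted row into a running total,
--     # instead of building the whole weighted matrix and then summing columns.
--     m = min(len(p), len(cs))
--     acc = [0] * len(cs[0])
--     for i in range(m):
--         acc = [a + p[i] * cs[i][l] for l, a in enumerate(acc)]
--     return acc
-- ===== Notes on version B (the rewrite author's own statement) =====
-- stated objective: simpler
-- what changed: B replaces A's build-matrix-of-weighted-rows-then-sum-each-column (with a try/except row skip) by a single running accumulator of length len(cs[0]) that each weighted row is folded into; no intermediate matrix, no second pass.
-- intended difference: When p is empty and cs[0] is nonempty (and cs contains an empty row, else A raises), A returns [] only because the empty row's comprehension never evaluates p[i]; B returns the zero vector of dimension len(cs[0]), the intended empty linear combination. — e.g. on p2cs([], [[1], []]): A returns [], B returns [0]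
import Mathlib
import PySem

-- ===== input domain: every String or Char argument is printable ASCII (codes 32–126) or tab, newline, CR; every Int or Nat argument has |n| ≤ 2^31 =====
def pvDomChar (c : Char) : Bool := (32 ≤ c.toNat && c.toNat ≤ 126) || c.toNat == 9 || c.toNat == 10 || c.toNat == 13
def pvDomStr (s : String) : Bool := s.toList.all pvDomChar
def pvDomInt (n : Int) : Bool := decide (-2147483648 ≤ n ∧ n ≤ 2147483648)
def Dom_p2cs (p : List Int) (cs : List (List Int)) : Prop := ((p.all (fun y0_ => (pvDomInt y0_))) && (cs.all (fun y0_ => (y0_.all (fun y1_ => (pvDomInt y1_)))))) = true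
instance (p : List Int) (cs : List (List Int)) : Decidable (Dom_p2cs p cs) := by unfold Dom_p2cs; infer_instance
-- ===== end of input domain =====

-- B replaces A's build-matrix-then-sum-columns by a single running accumulator (simpler; O(k) extra space).

-- ===== PORT A =====
-- try/except IndexError: p[i] inside the comprehension raises iff i ≥ len(p) AND the row is
-- nonempty (an empty row's comprehension never evaluates p[i]); cs[i][x] with x ∈ range(len(cs[i]))
-- never raises. The 'if' below is exactly that condition.
def p2cs (p : List Int) (cs : List (List Int)) : List Int :=
  let tempcoords : List (List Int) :=
    (PySem.List.pyRange 0 cs.length 1).foldl (fun tc i =>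
      if i < (p.length : Int) ∨ PySem.List.pyGetD cs i [] = [] then
        tc ++ [(PySem.List.pyRange 0 (PySem.List.pyGetD cs i []).length 1).map
                 (fun x => PySem.List.pyGetD p i 0 * PySem.List.pyGetD (PySem.List.pyGetD cs i []) x 0)]
      else tc) []
  (PySem.List.pyRange 0 (PySem.List.pyGetD tempcoords 0 []).length 1).map
    (fun l => ((PySem.List.pyRange 0 tempcoords.length 1).map
       (fun k => PySem.List.pyGetD (PySem.List.pyGetD tempcoords k []) l 0)).sum)

-- ===== PORT B =====
def p2cs_alt (p : List Int) (cs : List (List Int)) : List Int :=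
  let m : Int := min (p.length : Int) (cs.length : Int)
  let acc0 : List Int := List.replicate (PySem.List.pyGetD cs 0 []).length 0
  (PySem.List.pyRange 0 m 1).foldl (fun acc i =>
    (PySem.List.enumerate acc).map
      (fun la => la.2 + PySem.List.pyGetD p i 0 * PySem.List.pyGetD (PySem.List.pyGetD cs i []) la.1 0)) acc0

-- ===== PRECONDITION & SPEC =====
-- Pre_ is exactly the set of inputs on which the Python A returns normally: cs nonempty;
-- if p is empty, some row of cs must be empty (else tempcoords = [] and tempcoords[0] raises);
-- if p is nonempty, every row A keeps (index < min(len p, len cs), or an empty row) must be at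
-- least as long as cs[0] (else the final column sum raises IndexError).
def Pre_p2cs (p : List Int) (cs : List (List Int)) : Prop :=
  cs ≠ [] ∧
  (p = [] → [] ∈ cs) ∧
  (p ≠ [] → ∀ i < cs.length, (i < min p.length cs.length ∨ cs.getD i [] = []) →
      (cs.getD 0 []).length ≤ (cs.getD i []).length)
instance (p : List Int) (cs : List (List Int)) : Decidable (Pre_p2cs p cs) := by
  unfold Pre_p2cs; infer_instance
def pvWitness_p2cs : List Int × List (List Int) := ([1, 2], [[1, 0], [0, 1]])

-- When p is empty and cs[0] is nonempty (and, by Pre_, some row of cs is empty), A returns []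
-- only because the empty row's comprehension never evaluates p[i]; B returns the zero vector of
-- dimension len(cs[0]), the intended empty linear combination.
def D_p2cs (p : List Int) (cs : List (List Int)) : Prop := p = [] ∧ cs.getD 0 [] ≠ []
instance (p : List Int) (cs : List (List Int)) : Decidable (D_p2cs p cs) := by
  unfold D_p2cs; infer_instance

def Spec_p2cs (p : List Int) (cs : List (List Int)) (out : List Int) : Prop :=
  ¬ D_p2cs p cs → out = p2cs_alt p cs
instance (p : List Int) (cs : List (List Int)) (out : List Int) : Decidable (Spec_p2cs p cs out) := by
  unfold Spec_p2cs; infer_instance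

def pvDiffWitness_p2cs : List Int × List (List Int) := ([], [[1], []])
def pvDiffWitnessOut_p2cs : (List Int) × (List Int) := ([], [0])

-- ===== CLAIM (what is proved, stated in full; the proofs are below) =====
def Claim_unchanged_p2cs : Prop := ∀ (p : List Int) (cs : List (List Int)),
  Dom_p2cs p cs → Pre_p2cs p cs → Spec_p2cs p cs (p2cs p cs)
def Claim_changed_p2cs : Prop :=
  Dom_p2cs (pvDiffWitness_p2cs.1) (pvDiffWitness_p2cs.2) ∧
  Pre_p2cs (pvDiffWitness_p2cs.1) (pvDiffWitness_p2cs.2) ∧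
  D_p2cs (pvDiffWitness_p2cs.1) (pvDiffWitness_p2cs.2) ∧
  p2cs (pvDiffWitness_p2cs.1) (pvDiffWitness_p2cs.2) = pvDiffWitnessOut_p2cs.1 ∧
  p2cs_alt (pvDiffWitness_p2cs.1) (pvDiffWitness_p2cs.2) = pvDiffWitnessOut_p2cs.2 ∧
  pvDiffWitnessOut_p2cs.1 ≠ pvDiffWitnessOut_p2cs.2
def Claim_exact_p2cs : Prop := ∀ (p : List Int) (cs : List (List Int)),
  Dom_p2cs p cs → Pre_p2cs p cs → D_p2cs p cs → p2cs p cs ≠ p2cs_alt p cs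

-- ===== LEMMAS AND PROOFS =====

def termB (p : List Int) (cs : List (List Int)) (i : Int) (l : Nat) : Int :=
  PySem.List.pyGetD p i 0 * PySem.List.pyGetD (PySem.List.pyGetD cs i []) (l : Int) 0

theorem stepB_eq (p : List Int) (cs : List (List Int)) (i : Int) (n : Nat) (g : Nat → Int) :
    (PySem.List.enumerate ((List.range n).map g)).map
      (fun la => la.2 + PySem.List.pyGetD p i 0 * PySem.List.pyGetD (PySem.List.pyGetD cs i []) la.1 0)
    = (List.range n).map (fun l => g l + termB p cs i l) := by
  rw [PySem.List.enumerate_eq_map_pyRange (d := 0), PySem.List.pyRange_one]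
  simp only [List.map_map, sub_zero, PySem.List.len_eq, List.length_map, List.length_range,
    Int.toNat_natCast]
  refine List.map_congr_left (fun k hk => ?_)
  simp only [List.mem_range] at hk
  simp [termB, PySem.List.pyGetD_natCast, List.getElem?_range hk]

theorem foldB_eq (p : List Int) (cs : List (List Int)) (L : List Int) (n : Nat) (g : Nat → Int) :
    L.foldl (fun acc i => (PySem.List.enumerate acc).map
      (fun la => la.2 + PySem.List.pyGetD p i 0 * PySem.List.pyGetD (PySem.List.pyGetD cs i []) la.1 0))
      ((List.range n).map g)
    = (List.range n).map (fun l => g l + (L.map (fun i => termB p cs i l)).sum) := by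
  induction L generalizing g with
  | nil => simp
  | cons i L ih =>
    rw [List.foldl_cons, stepB_eq, ih]
    refine List.map_congr_left (fun k _ => ?_)
    simp [add_assoc]

-- tempcoords as filter+map
theorem temp_eq (p : List Int) (cs : List (List Int)) :
    ((PySem.List.pyRange 0 cs.length 1).foldl (fun tc i =>
      if i < (p.length : Int) ∨ PySem.List.pyGetD cs i [] = [] then
        tc ++ [(PySem.List.pyRange 0 (PySem.List.pyGetD cs i []).length 1).map
                 (fun x => PySem.List.pyGetD p i 0 * PySem.List.pyGetD (PySem.List.pyGetD cs i []) x 0)]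
      else tc) [])
    = ((PySem.List.pyRange 0 cs.length 1).filter
        (fun i => decide (i < (p.length : Int) ∨ PySem.List.pyGetD cs i [] = []))).map
      (fun i => (PySem.List.pyRange 0 (PySem.List.pyGetD cs i []).length 1).map
                 (fun x => PySem.List.pyGetD p i 0 * PySem.List.pyGetD (PySem.List.pyGetD cs i []) x 0)) := by
  rw [PySem.List.foldl_append_ite]
  simp

theorem alt_eq (p : List Int) (cs : List (List Int)) :
    p2cs_alt p cs = (List.range (cs.getD 0 []).length).map (fun l =>
      ((PySem.List.pyRange 0 ((min p.length cs.length : Nat) : Int) 1).map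
        (fun i => termB p cs i l)).sum) := by
  unfold p2cs_alt
  have hmin : (min (p.length : Int) (cs.length : Int)) = ((min p.length cs.length : Nat) : Int) := by
    exact_mod_cast (Nat.cast_min ..).symm
  have hrep : List.replicate (PySem.List.pyGetD cs 0 []).length (0:Int)
      = (List.range (cs.getD 0 []).length).map (fun _ => 0) := by
    rw [List.map_const', List.length_range, PySem.List.pyGetD_zero]
  simp only [hmin, hrep]
  rw [foldB_eq]
  simp

theorem filter_main (p : List Int) (cs : List (List Int))
    (h3 : ∀ i < cs.length, (i < min p.length cs.length ∨ cs.getD i [] = []) →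
      (cs.getD 0 []).length ≤ (cs.getD i []).length)
    (hn0 : 0 < (cs.getD 0 []).length) :
    (PySem.List.pyRange 0 cs.length 1).filter
        (fun i => decide (i < (p.length : Int) ∨ PySem.List.pyGetD cs i [] = []))
    = PySem.List.pyRange 0 ((min p.length cs.length : Nat) : Int) 1 := by
  have hm : ((min p.length cs.length : Nat) : Int) ≤ (cs.length : Int) := by
    exact_mod_cast Nat.min_le_right _ _
  rw [PySem.List.pyRange_one_append 0 ((min p.length cs.length : Nat) : Int) cs.length
    (by positivity) hm, List.filter_append]
  have h1 : (PySem.List.pyRange 0 ((min p.length cs.length : Nat) : Int) 1).filter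
      (fun i => decide (i < (p.length : Int) ∨ PySem.List.pyGetD cs i [] = []))
      = PySem.List.pyRange 0 ((min p.length cs.length : Nat) : Int) 1 := by
    rw [List.filter_eq_self]
    intro i hi
    rw [PySem.List.mem_pyRange_one] at hi
    simp only [decide_eq_true_eq]
    left
    have : ((min p.length cs.length : Nat) : Int) ≤ (p.length : Int) := by
      exact_mod_cast Nat.min_le_left _ _
    omega
  have h2 : (PySem.List.pyRange ((min p.length cs.length : Nat) : Int) cs.length 1).filter
      (fun i => decide (i < (p.length : Int) ∨ PySem.List.pyGetD cs i [] = []))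
      = [] := by
    rw [List.filter_eq_nil_iff]
    intro i hi
    rw [PySem.List.mem_pyRange_one] at hi
    simp only [decide_eq_true_eq, not_or]
    have hmin : min p.length cs.length = p.length := by
      rcases Nat.lt_or_ge p.length cs.length with h | h
      · exact Nat.min_eq_left (Nat.le_of_lt h)
      · omega
    constructor
    · rw [hmin] at hi; omega
    · intro hrow
      have h0i : (0:Int) ≤ i := le_trans (by positivity) hi.1
      have : i = ((i.toNat : Nat) : Int) := (Int.toNat_of_nonneg h0i).symm
      rw [this, PySem.List.pyGetD_natCast] at hrow
      have hilen : i.toNat < cs.length := by omega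
      have := h3 i.toNat hilen (Or.inr hrow)
      rw [hrow] at this
      simp only [List.length_nil, Nat.le_zero] at this
      omega
  rw [h1, h2, List.append_nil]

theorem getD0_of_all_nil (ts : List (List Int)) (h : ∀ x ∈ ts, x = []) :
    PySem.List.pyGetD ts 0 [] = [] := by
  cases ts with
  | nil => simp [PySem.List.pyGetD, PySem.List.pyGet?]
  | cons a t => rw [PySem.List.pyGetD_zero_cons]; exact h a (List.mem_cons_self)

-- A returns [] whenever p = [] (every surviving row is an empty row)
theorem a_p_nil (p : List Int) (cs : List (List Int)) (hp : p = []) : p2cs p cs = [] := by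
  simp only [p2cs]
  rw [temp_eq]
  have hall : ∀ x ∈ ((PySem.List.pyRange 0 cs.length 1).filter
      (fun i => decide (i < (p.length : Int) ∨ PySem.List.pyGetD cs i [] = []))).map
      (fun i => (PySem.List.pyRange 0 (PySem.List.pyGetD cs i []).length 1).map
                 (fun x => PySem.List.pyGetD p i 0 * PySem.List.pyGetD (PySem.List.pyGetD cs i []) x 0)),
      x = [] := by
    intro x hx
    rw [List.mem_map] at hx
    obtain ⟨i, hi, rfl⟩ := hx
    rw [List.mem_filter] at hi
    have hmem := hi.1
    rw [PySem.List.mem_pyRange_one] at hmem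
    have := hi.2
    simp only [decide_eq_true_eq, hp] at this
    rcases this with h | h
    · simp at h; omega
    · rw [h]; simp [PySem.List.pyRange]
  rw [getD0_of_all_nil _ hall]
  simp [PySem.List.pyRange]

theorem a_cols_zero (p : List Int) (cs : List (List Int)) (hp : p ≠ []) (hcs : cs ≠ [])
    (h0 : (cs.getD 0 []).length = 0) : p2cs p cs = [] := by
  simp only [p2cs]
  rw [temp_eq]
  have hcsl : (0:Int) < cs.length := by
    cases cs with | nil => exact absurd rfl hcs | cons a t => exact_mod_cast Nat.succ_pos t.length
  rw [PySem.List.pyRange_one_cons hcsl]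
  have hq : (decide ((0:Int) < (p.length : Int) ∨ PySem.List.pyGetD cs 0 [] = [])) = true := by
    simp only [decide_eq_true_eq]
    left
    cases p with | nil => exact absurd rfl hp | cons a t => exact_mod_cast Nat.succ_pos t.length
  rw [List.filter_cons, hq]
  simp only [if_true, List.map_cons, PySem.List.pyGetD_zero_cons]
  have : ((PySem.List.pyGetD cs 0 []).length : Int) = 0 := by
    rw [PySem.List.pyGetD_zero, h0]; rfl
  simp [this, PySem.List.pyRange]

theorem a_main (p : List Int) (cs : List (List Int)) (hp : p ≠ []) (hcs : cs ≠ [])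
    (h3 : ∀ i < cs.length, (i < min p.length cs.length ∨ cs.getD i [] = []) →
      (cs.getD 0 []).length ≤ (cs.getD i []).length)
    (hn0 : 0 < (cs.getD 0 []).length) :
    p2cs p cs = (List.range (cs.getD 0 []).length).map (fun l =>
      ((PySem.List.pyRange 0 ((min p.length cs.length : Nat) : Int) 1).map
        (fun i => termB p cs i l)).sum) := by
  simp only [p2cs]
  rw [temp_eq, filter_main p cs h3 hn0]
  have hMpos : (0:Int) < ((min p.length cs.length : Nat) : Int) := by
    cases p with
    | nil => exact absurd rfl hp
    | cons a t =>
      cases cs with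
      | nil => exact absurd rfl hcs
      | cons b u => exact_mod_cast Nat.lt_of_lt_of_le (Nat.succ_pos 0) (le_min (Nat.succ_le_succ (Nat.zero_le _)) (Nat.succ_le_succ (Nat.zero_le _)))
  -- head row = rowA 0
  rw [PySem.List.pyGetD_map_pyRange_of_nonneg _ _ _ _ le_rfl hMpos]
  have hlen0 : ((PySem.List.pyRange 0 ((PySem.List.pyGetD cs 0 []).length : Int) 1).map
      (fun x => PySem.List.pyGetD p 0 0 * PySem.List.pyGetD (PySem.List.pyGetD cs 0 []) x 0)).length
      = (cs.getD 0 []).length := by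
    rw [List.length_map, PySem.List.length_pyRange_one]
    simp [PySem.List.pyGetD_zero]
  rw [hlen0]
  have hlenT : (((PySem.List.pyRange 0 ((min p.length cs.length : Nat) : Int) 1).map
      (fun i => (PySem.List.pyRange 0 ((PySem.List.pyGetD cs i []).length : Int) 1).map
        (fun x => PySem.List.pyGetD p i 0 * PySem.List.pyGetD (PySem.List.pyGetD cs i []) x 0))).length : Int)
      = ((min p.length cs.length : Nat) : Int) := by
    rw [List.length_map, PySem.List.length_pyRange_one]
    omega
  rw [hlenT]
  rw [PySem.List.pyRange_one 0 ((cs.getD 0 []).length : Int)]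
  simp only [List.map_map, sub_zero, Int.toNat_natCast]
  refine List.map_congr_left (fun l hl => ?_)
  simp only [List.mem_range] at hl
  simp only [Function.comp, zero_add]
  congr 1
  refine List.map_congr_left (fun k hk => ?_)
  rw [PySem.List.mem_pyRange_one] at hk
  -- tempcoords[k] = rowA k
  rw [PySem.List.pyGetD_map_pyRange_of_nonneg _ _ _ _ hk.1 hk.2]
  -- rowA k at column l
  have hkNat : k = ((k.toNat : Nat) : Int) := (Int.toNat_of_nonneg hk.1).symm
  have hklen : k.toNat < cs.length := by
    have : ((min p.length cs.length : Nat) : Int) ≤ (cs.length : Int) := by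
      exact_mod_cast Nat.min_le_right _ _
    omega
  have hrowlen : (cs.getD 0 []).length ≤ (cs.getD k.toNat []).length := by
    refine h3 k.toNat hklen (Or.inl ?_)
    omega
  have hget : PySem.List.pyGetD cs k [] = cs.getD k.toNat [] := by
    rw [hkNat, PySem.List.pyGetD_natCast]
    simp only [List.getD_eq_getElem?_getD]
    congr 2
  have hlbound : (l : Int) < ((PySem.List.pyGetD cs k []).length : Int) := by
    rw [hget]; exact_mod_cast Nat.lt_of_lt_of_le hl hrowlen
  rw [PySem.List.pyGetD_map_pyRange_of_nonneg _ _ _ _ (by positivity) hlbound]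
  rfl

theorem b_nil_cols (p : List Int) (cs : List (List Int)) (h0 : (cs.getD 0 []).length = 0) :
    p2cs_alt p cs = [] := by
  rw [alt_eq, h0]
  simp


-- ===== VERDICT (by name: the statement is the Claim_ definition above) =====
theorem p2cs_spec : Claim_unchanged_p2cs := by
  intro p cs _ hpre hnd
  obtain ⟨hcs, hpe, hpne⟩ := hpre
  by_cases hp : p = []
  · have h0 : cs.getD 0 [] = [] := by
      by_contra h
      exact hnd ⟨hp, h⟩
    rw [a_p_nil p cs hp, b_nil_cols p cs (by rw [h0]; rfl)]
  · by_cases hn0 : 0 < (cs.getD 0 []).length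
    · exact (a_main p cs hp hcs (hpne hp) hn0).trans (alt_eq p cs).symm
    · rw [a_cols_zero p cs hp hcs (by omega), b_nil_cols p cs (by omega)]
theorem p2cs_changed : Claim_changed_p2cs := by unfold Claim_changed_p2cs; decide
theorem p2cs_tight : Claim_exact_p2cs := by
  intro p cs _ _ hd heq
  rw [a_p_nil p cs hd.1] at heq
  have hlen := congrArg List.length heq
  rw [alt_eq] at hlen
  simp at hlen
  exact hd.2 (by simpa using List.eq_nil_of_length_eq_zero hlen.symm)
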